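-- pv_equiv track=rewrite | github.com/itsutkarshm/attendance-converter | attendance_ui.py | group_days
-- ===== SOURCE A (Python) =====
-- def group_days(attendance_row, status_filter):
--     ranges = []
--     start = None
--     last_status = None
--
--     for day in range(1, 32):
--         status = str(attendance_row.get(str(day), "")).strip().upper()
--         if status == status_filter:
--             if start is None:
--                 start = day
--                 last_status = status
--             elif status != last_status:
--                 ranges.append((start, day - 1, last_status))
--                 start = day
--                 last_status = status
--         else:
--             if start is not None:
--                 ranges.append((start, day - 1, last_status))
--                 start = None
--                 last_status = None
--
--     if start is not None:
--         ranges.append((start, 31, last_status))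
--     return ranges
-- ===== SOURCE B (Python) =====
-- def group_days(attendance_row, status_filter):
--     matches = [d for d in range(1, 32)
--                if str(attendance_row.get(str(d), "")).strip().upper() == status_filter]
--     if not matches:
--         return []
--     ranges = []
--     run_start = prev = matches[0]
--     for d in matches[1:]:
--         if d != prev + 1:
--             ranges.append((run_start, prev, status_filter))
--             run_start = d
--         prev = d
--     ranges.append((run_start, prev, status_filter))
--     return ranges
-- ===== Notes on version B (the rewrite author's own statement) =====
-- stated objective: simpler
-- what changed: Replaces A's interleaved start/last_status state machine (with a dead status!=last_status branch) by a filter-then-group decomposition: first collect the matching days, then split that sorted list at gaps into maximal consecutive runs.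
import Mathlib
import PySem

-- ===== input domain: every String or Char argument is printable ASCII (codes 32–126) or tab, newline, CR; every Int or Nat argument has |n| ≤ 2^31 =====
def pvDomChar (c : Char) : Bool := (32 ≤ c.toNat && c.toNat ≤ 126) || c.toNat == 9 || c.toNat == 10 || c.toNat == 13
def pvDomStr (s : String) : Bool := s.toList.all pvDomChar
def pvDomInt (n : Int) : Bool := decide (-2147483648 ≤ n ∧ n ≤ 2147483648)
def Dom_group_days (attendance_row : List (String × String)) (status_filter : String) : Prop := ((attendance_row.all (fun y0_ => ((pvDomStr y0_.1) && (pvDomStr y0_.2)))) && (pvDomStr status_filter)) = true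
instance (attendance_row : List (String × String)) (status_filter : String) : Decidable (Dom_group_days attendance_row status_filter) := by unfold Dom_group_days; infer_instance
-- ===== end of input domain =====

-- B replaces A's interleaved start/last_status state machine by a filter-then-group
-- decomposition (collect matching days, then split at gaps); objective: simpler.

-- ===== PORT A =====
-- attendance_row.get(str(day), ""): association list, first match (the dict convention)
def pvGet (row : List (String × String)) (k : String) : String :=
  match row.lookup k with
  | some v => v
  | none => ""

-- str(...).strip().upper() of the looked-up value (str() of a str is the identity)
def pvNorm (row : List (String × String)) (day : Int) : String :=
  PySem.Str.upper (PySem.Str.strip (pvGet row (PySem.Int.toStr day)))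

-- one iteration of A's for-loop; state = (ranges, start, last_status)
def stepA (row : List (String × String)) (sf : String)
    (st : List (Int × Int × String) × Option Int × Option String) (day : Int) :
    List (Int × Int × String) × Option Int × Option String :=
  let status := pvNorm row day
  if status = sf then
    match st.2.1 with
    | none => (st.1, some day, some status)
    | some s =>
        if some status ≠ st.2.2 then
          (st.1 ++ [(s, day - 1, (st.2.2).getD "")], some day, some status)
        else st
  else
    match st.2.1 with
    | some s => (st.1 ++ [(s, day - 1, (st.2.2).getD "")], none, none)
    | none => st

def group_days (attendance_row : List (String × String)) (status_filter : String) :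
    List (Int × Int × String) :=
  let r := (PySem.List.pyRange 1 32 1).foldl (stepA attendance_row status_filter) ([], none, none)
  match r.2.1 with
  | some s => r.1 ++ [(s, 31, (r.2.2).getD "")]
  | none => r.1

-- ===== PORT B =====
-- one iteration of B's for-loop over matches[1:]; state = (ranges, run_start, prev)
def stepB (sf : String) (st : List (Int × Int × String) × Int × Int) (d : Int) :
    List (Int × Int × String) × Int × Int :=
  if d ≠ st.2.2 + 1 then (st.1 ++ [(st.2.1, st.2.2, sf)], d, d) else (st.1, st.2.1, d)

def group_days_alt (attendance_row : List (String × String)) (status_filter : String) :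
    List (Int × Int × String) :=
  let ms := (PySem.List.pyRange 1 32 1).filter
    (fun d => decide (pvNorm attendance_row d = status_filter))
  match ms with
  | [] => []
  | m0 :: rest =>
      let r := rest.foldl (stepB status_filter) ([], m0, m0)
      r.1 ++ [(r.2.1, r.2.2, status_filter)]

-- ===== PRECONDITION & SPEC =====
def Spec_group_days (attendance_row : List (String × String)) (status_filter : String) (out : List (Int × Int × String)) : Prop := out = group_days_alt attendance_row status_filter
instance (attendance_row : List (String × String)) (status_filter : String) (out : List (Int × Int × String)) : Decidable (Spec_group_days attendance_row status_filter out) := by unfold Spec_group_days; infer_instance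

-- ===== CLAIM (what is proved, stated in full; the proofs are below) =====
def Claim_equal_group_days : Prop := ∀ (attendance_row : List (String × String)) (status_filter : String), Dom_group_days attendance_row status_filter → Spec_group_days attendance_row status_filter (group_days attendance_row status_filter)

-- ===== LEMMAS AND PROOFS =====

-- [a, a+1, ..., a+k-1]
def consec (a : Int) : Nat → List Int
  | 0 => []
  | k + 1 => a :: consec (a + 1) k

lemma pyRange_eq_consec : PySem.List.pyRange 1 32 1 = consec 1 31 := by decide

lemma mem_consec {a x : Int} {k : Nat} (h : x ∈ consec a k) : a ≤ x := by
  induction k generalizing a with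
  | zero => simp [consec] at h
  | succ k ih =>
      simp only [consec, List.mem_cons] at h
      rcases h with rfl | h
      · omega
      · have := ih h; omega

-- B's grouping of a run in progress (run_start = s, prev) over the remaining matches
def runB (sf : String) (s prev : Int) (L : List Int) : List (Int × Int × String) :=
  let r := L.foldl (stepB sf) ([], s, prev)
  r.1 ++ [(r.2.1, r.2.2, sf)]

def groupAll (sf : String) (L : List Int) : List (Int × Int × String) :=
  match L with
  | [] => []
  | m0 :: rest => runB sf m0 m0 rest

-- stepB only appends to the ranges component: the accumulator factors out
lemma foldB_acc (sf : String) (L : List Int) (r : List (Int × Int × String)) (rs prev : Int) :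
    L.foldl (stepB sf) (r, rs, prev)
      = (r ++ (L.foldl (stepB sf) ([], rs, prev)).1, (L.foldl (stepB sf) ([], rs, prev)).2) := by
  induction L generalizing r rs prev with
  | nil => simp
  | cons d L ih =>
      simp only [List.foldl_cons]
      by_cases h : d = prev + 1
      · have e1 : stepB sf (r, rs, prev) d = (r, rs, d) := by simp [stepB, h]
        have e2 : stepB sf ([], rs, prev) d = ([], rs, d) := by simp [stepB, h]
        rw [e1, e2, ih]
      · have e1 : stepB sf (r, rs, prev) d = (r ++ [(rs, prev, sf)], d, d) := by
          simp [stepB, h]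
        have e2 : stepB sf ([], rs, prev) d = ([(rs, prev, sf)], d, d) := by
          simp [stepB, h]
        rw [e1, e2, ih, ih [(rs, prev, sf)]]
        simp

lemma runB_cons_ne (sf : String) (s prev m0 : Int) (rest : List Int) (h : m0 ≠ prev + 1) :
    runB sf s prev (m0 :: rest) = (s, prev, sf) :: runB sf m0 m0 rest := by
  simp only [runB, List.foldl_cons]
  have e : stepB sf (([] : List (Int × Int × String)), s, prev) m0 = ([(s, prev, sf)], m0, m0) := by
    simp [stepB, h]
  rw [e, foldB_acc sf rest [(s, prev, sf)]]
  simp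

lemma runB_cons_eq (sf : String) (s prev m0 : Int) (rest : List Int) (h : m0 = prev + 1) :
    runB sf s prev (m0 :: rest) = runB sf s m0 rest := by
  simp only [runB, List.foldl_cons]
  have e : stepB sf (([] : List (Int × Int × String)), s, prev) m0 = ([], s, m0) := by
    simp [stepB, h]
  rw [e]

lemma runB_gap (sf : String) (s prev : Int) (F : List Int) (h : ∀ x ∈ F, x ≠ prev + 1) :
    runB sf s prev F = (s, prev, sf) :: groupAll sf F := by
  cases F with
  | nil => simp [runB, groupAll]
  | cons m0 rest =>
      rw [runB_cons_ne sf s prev m0 rest (h m0 (by simp))]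
      rfl

def finalizeA (e : Int) (r : List (Int × Int × String) × Option Int × Option String) :
    List (Int × Int × String) :=
  match r.2.1 with
  | some s => r.1 ++ [(s, e, (r.2.2).getD "")]
  | none => r.1

lemma groupA_eq (row : List (String × String)) (sf : String) :
    group_days row sf
      = finalizeA 31 ((consec 1 31).foldl (stepA row sf) ([], none, none)) := by
  unfold group_days finalizeA
  rw [pyRange_eq_consec]

lemma groupAlt_eq (row : List (String × String)) (sf : String) :
    group_days_alt row sf
      = groupAll sf ((consec 1 31).filter (fun d => decide (pvNorm row d = sf))) := by
  unfold group_days_alt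
  rw [pyRange_eq_consec]
  cases hF : (consec 1 31).filter (fun d => decide (pvNorm row d = sf)) with
  | nil => simp [groupAll]
  | cons m0 rest => simp [groupAll, runB]

-- main invariant: A's fold from a closed / open state equals B's filter-then-group
set_option maxHeartbeats 2000000 in
lemma main_inv (row : List (String × String)) (sf : String) :
    ∀ (k : Nat) (a e : Int) (acc : List (Int × Int × String)), e = a + (k : Int) - 1 →
      (finalizeA e ((consec a k).foldl (stepA row sf) (acc, none, none))
          = acc ++ groupAll sf ((consec a k).filter (fun d => decide (pvNorm row d = sf))))
      ∧ (∀ s : Int,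
          finalizeA e ((consec a k).foldl (stepA row sf) (acc, some s, some sf))
            = acc ++ runB sf s (a - 1) ((consec a k).filter (fun d => decide (pvNorm row d = sf)))) := by
  intro k
  induction k with
  | zero =>
      intro a e acc he
      refine ⟨by simp [consec, finalizeA, groupAll], fun s => ?_⟩
      have hk : (0 : Nat) = 0 := rfl
      have hea : e = a - 1 := by push_cast at he; omega
      simp [consec, finalizeA, runB, hea]
  | succ k ih =>
      intro a e acc he
      have he' : e = (a + 1) + (k : Int) - 1 := by push_cast at he ⊢; omega
      by_cases hp : pvNorm row a = sf
      · have hf : (consec a (k + 1)).filter (fun d => decide (pvNorm row d = sf))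
            = a :: (consec (a + 1) k).filter (fun d => decide (pvNorm row d = sf)) := by
          simp [consec, hp]
        constructor
        · -- closed state, day a matches: open a new run at a
          have e1 : stepA row sf (acc, none, none) a = (acc, some a, some sf) := by
            simp [stepA, hp]
          rw [hf]
          simp only [consec, List.foldl_cons, e1]
          rw [(ih (a + 1) e acc he').2 a]
          have h2 : (a + 1) - 1 = a := by omega
          rw [h2]
          simp only [groupAll]
        · -- open state, day a matches: the run continues (the elif guard is false)
          intro s
          have e1 : stepA row sf (acc, some s, some sf) a = (acc, some s, some sf) := by
            simp [stepA, hp]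
          rw [hf]
          simp only [consec, List.foldl_cons, e1]
          rw [(ih (a + 1) e acc he').2 s]
          have h2 : (a + 1) - 1 = a := by omega
          rw [h2, runB_cons_eq sf s (a - 1) a _ (by omega)]
      · have hf : (consec a (k + 1)).filter (fun d => decide (pvNorm row d = sf))
            = (consec (a + 1) k).filter (fun d => decide (pvNorm row d = sf)) := by
          simp [consec, hp]
        constructor
        · -- closed state, day a does not match: nothing happens
          have e1 : stepA row sf (acc, none, none) a = (acc, none, none) := by
            simp [stepA, hp]
          rw [hf]
          simp only [consec, List.foldl_cons, e1]
          exact (ih (a + 1) e acc he').1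
        · -- open state, day a does not match: close the run at a - 1
          intro s
          have e1 : stepA row sf (acc, some s, some sf) a
              = (acc ++ [(s, a - 1, sf)], none, none) := by
            simp [stepA, hp]
          rw [hf]
          simp only [consec, List.foldl_cons, e1]
          rw [(ih (a + 1) e (acc ++ [(s, a - 1, sf)]) he').1]
          rw [runB_gap sf s (a - 1) _ ?gap]
          · simp
          case gap =>
            intro x hx
            have := mem_consec (List.mem_of_mem_filter hx)
            omega

-- ===== VERDICT (by name: the statement is the Claim_ definition above) =====
theorem group_days_spec : Claim_equal_group_days := by
  intro row sf _
  unfold Spec_group_days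
  rw [groupA_eq, groupAlt_eq]
  have h := (main_inv row sf 31 1 31 [] (by norm_num)).1
  simpa using h
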